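-- pv_equiv track=rewrite | github.com/nfernan1/speedreader | Google Drive/Documents/Class/2013/ICS 33/Solutions copy/inlabexam1students/Lab 4/GurleyConnor/exam.py | find_influencers
-- ===== SOURCE A (Python) =====
-- from math        import ceil
-- from collections import defaultdict # Use dict or defaultdict
--
-- def find_influencers(graph):
--     infl = defaultdict(int)
--     for key in graph.keys():
--         friends = len(graph[key])
--         half = ceil(friends/2)
--         infl[key]=friends - half
--     while True:
--         cand = []
--         for key in infl.keys():
--             if infl[key]>=0:
--                 cand.append( (infl[key],len(graph[key]),key) )
--         if cand == []:
--             break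
--         cand = sorted(cand)
--         min_key = cand[0][-1]
--         infl.pop(min_key)
--         for key in infl.keys():
--             if min_key in graph[key]:
--                 infl[key]-=1
--
--     return set(infl.keys())
-- ===== SOURCE B (Python) =====
-- def find_influencers(graph):
--     # peel loop: pick the minimum (deficit, degree, key) candidate via a single
--     # min() scan (no per-round sort) and decrement only the keys found in a
--     # precomputed reverse-adjacency index (no per-round membership scan).
--     alive = {k: len(v) // 2 for k, v in graph.items()}
--     rev = {k: [] for k in graph}
--     for k, friends in graph.items():
--         for f in set(friends):
--             if f in rev:
--                 rev[f].append(k)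
--     while True:
--         cand = [(d, len(graph[k]), k) for k, d in alive.items() if d >= 0]
--         if not cand:
--             return set(alive)
--         mk = min(cand)[2]
--         del alive[mk]
--         for k in rev[mk]:
--             if k in alive:
--                 alive[k] -= 1
-- ===== Notes on version B (the rewrite author's own statement) =====
-- stated objective: faster
-- what changed: B replaces A's per-round full sort of the candidate list by a single min() scan and replaces A's per-round membership scan of every key's adjacency list by targeted decrements through a reverse-adjacency index built once up front.
import Mathlib
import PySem

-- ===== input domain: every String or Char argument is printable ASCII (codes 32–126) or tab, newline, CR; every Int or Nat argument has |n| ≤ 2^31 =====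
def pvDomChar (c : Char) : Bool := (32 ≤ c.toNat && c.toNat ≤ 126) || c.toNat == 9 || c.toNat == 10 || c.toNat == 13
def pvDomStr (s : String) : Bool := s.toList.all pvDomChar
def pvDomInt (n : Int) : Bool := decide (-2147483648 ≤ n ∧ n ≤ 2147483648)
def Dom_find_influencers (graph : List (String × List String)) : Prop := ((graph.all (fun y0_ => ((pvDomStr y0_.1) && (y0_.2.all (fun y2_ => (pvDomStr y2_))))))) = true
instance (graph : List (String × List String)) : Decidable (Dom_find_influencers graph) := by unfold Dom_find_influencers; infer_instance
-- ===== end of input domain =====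

-- B replaces A's per-round full sort and per-round membership scan over every key by a
-- single min() scan and a precomputed reverse-adjacency index (objective: faster).

-- Python's lexicographic order on the tuples (infl, deg, key); used as the sort/min key by both ports.
def fiKey (t : Int × Int × String) : Lex (Int × Lex (Int × String)) :=
  toLex (t.1, toLex (t.2.1, t.2.2))

-- ===== PORT A =====

-- math.ceil(n/2); exact for the int arguments that occur here (list lengths, far below 2^53)
def fiCeilHalf (n : Int) : Int := -(PySem.Int.floordiv (-n) 2)

-- the 'while True' loop of A; fuel = number of keys + 1 always suffices (each round pops a key or breaks)
def fiLoopA (g : PySem.Dict String (List String)) :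
    Nat → PySem.Dict String Int → PySem.Dict String Int
  | 0, infl => infl
  | fuel+1, infl =>
    let cand : List (Int × Int × String) :=
      infl.keys.foldl (fun acc key =>
        if infl.getD key 0 ≥ 0 then
          acc ++ [(infl.getD key 0, ((g.getD key []).length : Int), key)]
        else acc) []
    if cand = [] then infl
    else
      let candS := PySem.List.sorted cand fiKey false
      match PySem.List.pyGet? candS 0 with          -- cand[0]
      | none => infl                                 -- unreachable: cand ≠ []
      | some t =>
        let min_key := t.2.2                         -- cand[0][-1]
        let infl1 := infl.erase min_key              -- infl.pop(min_key)
        let infl2 := infl1.keys.foldl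
          (fun d key => if (g.getD key []).contains min_key then d.modify key 0 (· - 1) else d)
          infl1
        fiLoopA g fuel infl2

def find_influencers (graph : List (String × List String)) : List String :=
  let g := PySem.Dict.ofList graph
  let infl := g.keys.foldl (fun d key =>
      let friends : Int := ((g.getD key []).length : Int)
      let half := fiCeilHalf friends
      d.insert key (friends - half)) PySem.Dict.empty
  PySem.Set.ofList (fiLoopA g (infl.size + 1) infl).keys

-- ===== PORT B =====

-- B's peel loop: min() instead of sort, targeted decrements through the reverse index `rev`
def fiLoopB (g rev : PySem.Dict String (List String)) :
    Nat → PySem.Dict String Int → List String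
  | 0, alive => PySem.Set.ofList alive.keys
  | fuel+1, alive =>
    let cand : List (Int × Int × String) :=
      (alive.items.filter (fun p => p.2 ≥ 0)).map
        (fun p => (p.2, ((g.getD p.1 []).length : Int), p.1))
    match PySem.List.min? cand fiKey with
    | none => PySem.Set.ofList alive.keys            -- if not cand: return set(alive)
    | some t =>
      let mk := t.2.2                                -- min(cand)[2]
      let alive1 := alive.erase mk                   -- del alive[mk]
      let alive2 := (rev.getD mk []).foldl
        (fun d k => if d.contains k then d.modify k 0 (· - 1) else d) alive1
      fiLoopB g rev fuel alive2

def find_influencers_alt (graph : List (String × List String)) : List String :=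
  let g := PySem.Dict.ofList graph
  let alive := g.items.foldl
      (fun d p => d.insert p.1 (PySem.Int.floordiv (p.2.length : Int) 2)) PySem.Dict.empty
  let rev0 := g.keys.foldl
      (fun d k => d.insert k ([] : List String)) PySem.Dict.empty
  -- for k, friends in graph.items(): for f in set(friends): if f in rev: rev[f].append(k)
  -- (each append targets a distinct rev entry, so the set's iteration order cannot matter)
  let rev := g.items.foldl
      (fun d p => (PySem.Set.ofList p.2).foldl
        (fun d f => if d.contains f then d.modify f [] (· ++ [p.1]) else d) d) rev0
  fiLoopB g rev (alive.size + 1) alive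

-- ===== PRECONDITION & SPEC =====
def Spec_find_influencers (graph : List (String × List String)) (out : List String) : Prop := out = find_influencers_alt graph
instance (graph : List (String × List String)) (out : List String) : Decidable (Spec_find_influencers graph out) := by unfold Spec_find_influencers; infer_instance

-- ===== CLAIM (what is proved, stated in full; the proofs are below) =====
def Claim_equal_find_influencers : Prop := ∀ (graph : List (String × List String)), Dom_find_influencers graph → Spec_find_influencers graph (find_influencers graph)

-- ===== LEMMAS AND PROOFS =====

lemma fiCeilHalf_sub (n : Int) :
    n - fiCeilHalf n = PySem.Int.floordiv n 2 := by
  unfold fiCeilHalf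
  have h1 := PySem.Int.floordiv_mul_add_mod n 2
  have h2 := PySem.Int.floordiv_mul_add_mod (-n) 2
  have h3 := PySem.Int.mod_nonneg n (show (0:Int) < 2 by norm_num)
  have h4 := PySem.Int.mod_lt n (show (0:Int) < 2 by norm_num)
  have h5 := PySem.Int.mod_nonneg (-n) (show (0:Int) < 2 by norm_num)
  have h6 := PySem.Int.mod_lt (-n) (show (0:Int) < 2 by norm_num)
  omega

lemma fiKey_inj : Function.Injective fiKey := by
  rintro ⟨a1, a2, a3⟩ ⟨b1, b2, b3⟩ h
  simp only [fiKey, toLex_inj, Prod.mk.injEq] at h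
  obtain ⟨rfl, rfl, rfl⟩ := h
  rfl

lemma sorted_head_min? (xs : List (Int × Int × String)) (t : Int × Int × String)
    (tl : List (Int × Int × String))
    (h : PySem.List.sorted xs fiKey false = t :: tl) :
    PySem.List.min? xs fiKey = some t := by
  have hne : xs ≠ [] := by
    intro hx
    rw [hx, (PySem.List.sorted_eq_nil_iff ([] : List (Int × Int × String)) fiKey false).2 rfl] at h
    simp at h
  obtain ⟨m, hm⟩ : ∃ m, PySem.List.min? xs fiKey = some m := by
    cases hmin : PySem.List.min? xs fiKey with
    | none => exact absurd ((PySem.List.min?_eq_none_iff xs fiKey).1 hmin) hne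
    | some m => exact ⟨m, rfl⟩
  have htmem : t ∈ xs := (PySem.List.mem_sorted xs fiKey false t).1 (h ▸ List.mem_cons_self)
  have h1 : fiKey m ≤ fiKey t := PySem.List.min?_isMin hm t htmem
  have h2 : fiKey t ≤ fiKey m := PySem.List.key_head_sorted_le xs fiKey h m (PySem.List.min?_mem hm)
  rw [hm, fiKey_inj (le_antisymm h1 h2)]

-- A's decrement loop over a key list: keys preserved, values decremented where the test holds
lemma decA_char (c : String → Bool) (ks : List String) :
    ∀ (d : PySem.Dict String Int), (∀ k ∈ ks, d.contains k = true) →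
      ((ks.foldl (fun d k => if c k then d.modify k 0 (· - 1) else d) d).keys = d.keys ∧
       ∀ x, (ks.foldl (fun d k => if c k then d.modify k 0 (· - 1) else d) d).getD x 0
             = d.getD x 0 - (if c x then (ks.count x : Int) else 0)) := by
  induction ks with
  | nil => intro d _; simp
  | cons k tl ih =>
    intro d hall
    have hk : d.contains k = true := hall k List.mem_cons_self
    by_cases hc : c k
    · have hstep : (if c k then d.modify k 0 (· - 1) else d) = d.modify k 0 (· - 1) := by simp [hc]
      have hcont : ∀ k' ∈ tl, (d.modify k 0 (· - 1)).contains k' = true := by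
        intro k' hk'
        rw [PySem.Dict.contains_modify]
        simp [hall k' (List.mem_cons_of_mem _ hk')]
      obtain ⟨ihk, ihv⟩ := ih (d.modify k 0 (· - 1)) hcont
      refine ⟨?_, ?_⟩
      · simp only [List.foldl_cons, hstep, ihk, PySem.Dict.keys_modify]
        exact PySem.Dict.keys_insert_of_contains d _ hk
      · intro x
        simp only [List.foldl_cons, hstep, ihv x, PySem.Dict.getD_modify, List.count_cons]
        by_cases hx : x = k
        · subst hx
          simp only [hc, if_true]
          push_cast
          simp
          ring
        · have hkx : ¬ k = x := fun h => hx h.symm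
          simp [hx, hkx]
    · have hstep : (if c k then d.modify k 0 (· - 1) else d) = d := by simp [hc]
      obtain ⟨ihk, ihv⟩ := ih d (fun k' hk' => hall k' (List.mem_cons_of_mem _ hk'))
      refine ⟨by simp only [List.foldl_cons, hstep, ihk], ?_⟩
      intro x
      simp only [List.foldl_cons, hstep, ihv x, List.count_cons]
      by_cases hx : x = k
      · subst hx; simp [Bool.not_eq_true] at hc; simp [hc]
      · have hkx : ¬ k = x := fun h => hx h.symm
        simp [hkx]

-- B's decrement loop over an arbitrary list, guarded by presence
lemma decB_char (ks : List String) :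
    ∀ (d : PySem.Dict String Int),
      ((ks.foldl (fun d k => if d.contains k then d.modify k 0 (· - 1) else d) d).keys = d.keys ∧
       ∀ x, (ks.foldl (fun d k => if d.contains k then d.modify k 0 (· - 1) else d) d).getD x 0
             = d.getD x 0 - (if d.contains x then (ks.count x : Int) else 0)) := by
  induction ks with
  | nil => intro d; simp
  | cons k tl ih =>
    intro d
    by_cases hc : d.contains k = true
    · have hstep : (if d.contains k then d.modify k 0 (· - 1) else d) = d.modify k 0 (· - 1) := by
        simp [hc]
      obtain ⟨ihk, ihv⟩ := ih (d.modify k 0 (· - 1))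
      have hcont : ∀ x, (d.modify k 0 (· - 1)).contains x = d.contains x := by
        intro x
        rw [PySem.Dict.contains_modify]
        by_cases hx : x = k
        · subst hx; simp [hc]
        · simp [hx]
      refine ⟨?_, ?_⟩
      · simp only [List.foldl_cons, hstep, ihk, PySem.Dict.keys_modify]
        exact PySem.Dict.keys_insert_of_contains d _ hc
      · intro x
        simp only [List.foldl_cons, hstep, ihv x, hcont x, PySem.Dict.getD_modify, List.count_cons]
        by_cases hx : x = k
        · subst hx
          simp only [hc, if_true]
          push_cast
          simp
          ring
        · have hkx : ¬ k = x := fun h => hx h.symm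
          simp [hx, hkx]
    · have hstep : (if d.contains k then d.modify k 0 (· - 1) else d) = d := by simp [hc]
      obtain ⟨ihk, ihv⟩ := ih d
      refine ⟨by simp only [List.foldl_cons, hstep, ihk], ?_⟩
      intro x
      simp only [List.foldl_cons, hstep, ihv x, List.count_cons]
      by_cases hx : x = k
      · subst hx; simp [Bool.not_eq_true] at hc; simp [hc]
      · have hkx : ¬ k = x := fun h => hx h.symm
        simp [hkx]

-- the inner loop of the reverse-index build: contains is invariant, one value gets one append
lemma revInner_contains (p1 : String) (fs : List String) :
    ∀ (d : PySem.Dict String (List String)) x,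
      ((fs.foldl (fun d f => if d.contains f then d.modify f [] (· ++ [p1]) else d) d).contains x
        = d.contains x) := by
  induction fs with
  | nil => intro d x; rfl
  | cons f tl ih =>
    intro d x
    by_cases hc : d.contains f = true
    · have hstep : (if d.contains f then d.modify f [] (· ++ [p1]) else d) = d.modify f [] (· ++ [p1]) := by simp [hc]
      rw [List.foldl_cons, hstep, ih, PySem.Dict.contains_modify]
      by_cases hx : x = f
      · subst hx; simp [hc]
      · simp [hx]
    · have hstep : (if d.contains f then d.modify f [] (· ++ [p1]) else d) = d := by simp [hc]
      rw [List.foldl_cons, hstep, ih]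

lemma revInner_getD (p1 : String) (fs : List String) :
    ∀ (d : PySem.Dict String (List String)) x, fs.Nodup →
      ((fs.foldl (fun d f => if d.contains f then d.modify f [] (· ++ [p1]) else d) d).getD x []
        = d.getD x [] ++ (if d.contains x = true ∧ x ∈ fs then [p1] else [])) := by
  induction fs with
  | nil => intro d x _; simp
  | cons f tl ih =>
    intro d x hnd
    have hf : f ∉ tl := (List.nodup_cons.1 hnd).1
    have htl : tl.Nodup := (List.nodup_cons.1 hnd).2
    by_cases hc : d.contains f = true
    · have hstep : (if d.contains f then d.modify f [] (· ++ [p1]) else d) = d.modify f [] (· ++ [p1]) := by simp [hc]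
      rw [List.foldl_cons, hstep, ih _ x htl]
      have hcont : (d.modify f [] (· ++ [p1])).contains x = d.contains x := by
        rw [PySem.Dict.contains_modify]
        by_cases hx : x = f
        · subst hx; simp [hc]
        · simp [hx]
      rw [hcont, PySem.Dict.getD_modify]
      by_cases hx : x = f
      · subst hx; simp [hc, hf]
      · simp [hx, List.mem_cons]
    · have hstep : (if d.contains f then d.modify f [] (· ++ [p1]) else d) = d := by simp [hc]
      rw [List.foldl_cons, hstep, ih _ x htl]
      by_cases hx : x = f
      · subst hx; simp [hc]
      · simp [hx, List.mem_cons]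

-- the outer reverse-index build over the items list
lemma revBuild_getD (l : List (String × List String)) :
    ∀ (d : PySem.Dict String (List String)) x,
      ((l.foldl (fun d p => (PySem.Set.ofList p.2).foldl
          (fun d f => if d.contains f then d.modify f [] (· ++ [p.1]) else d) d) d).getD x []
        = d.getD x [] ++ (if d.contains x = true
            then (l.filter (fun p => p.2.contains x)).map (·.1) else [])) := by
  induction l with
  | nil => intro d x; simp
  | cons p tl ih =>
    intro d x
    rw [List.foldl_cons, ih]
    have hmem : (x ∈ PySem.Set.ofList p.2) ↔ (p.2.contains x = true) := by
      simp [PySem.Set.mem_ofList]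
    rw [revInner_contains, revInner_getD p.1 (PySem.Set.ofList p.2) d x (PySem.Set.nodup_ofList p.2)]
    by_cases hc : d.contains x = true
    · by_cases hin : x ∈ p.2
      · simp [hc, hin]
      · simp [hc, hin]
    · simp [hc]

lemma rev0_getD (ks : List String) :
    ∀ (d : PySem.Dict String (List String)), (∀ x, d.getD x [] = []) →
      ∀ x, ((ks.foldl (fun d k => d.insert k ([] : List String)) d).getD x []) = [] := by
  induction ks with
  | nil => intro d h x; exact h x
  | cons k tl ih =>
    intro d h x
    rw [List.foldl_cons]
    refine ih _ (fun y => ?_) x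
    rw [PySem.Dict.getD_insert]
    by_cases hy : y = k
    · simp [hy]
    · simp [hy, h y]

lemma rev0_contains (ks : List String) :
    ∀ (d : PySem.Dict String (List String)) x,
      ((ks.foldl (fun d k => d.insert k ([] : List String)) d).contains x)
        = (d.contains x || ks.contains x) := by
  induction ks with
  | nil => intro d x; simp
  | cons k tl ih =>
    intro d x
    rw [List.foldl_cons, ih, PySem.Dict.contains_insert]
    by_cases hx : x = k <;> simp [hx, Bool.or_comm, Bool.or_left_comm]

-- counting occurrences in the built reverse index entry
lemma rev_count (g : PySem.Dict String (List String)) (hg : g.keys.Nodup)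
    (mk : String) (hmk : mk ∈ g.keys) (x : String) :
    (((g.items.foldl (fun d p => (PySem.Set.ofList p.2).foldl
        (fun d f => if d.contains f then d.modify f [] (· ++ [p.1]) else d) d)
        (g.keys.foldl (fun d k => d.insert k ([] : List String)) PySem.Dict.empty)).getD mk []).count x : Int)
      = if x ∈ g.keys ∧ (g.getD x []).contains mk = true then 1 else 0 := by
  set rev0 := g.keys.foldl (fun d k => d.insert k ([] : List String)) PySem.Dict.empty with hrev0
  have h0v : ∀ y, rev0.getD y [] = [] :=
    rev0_getD g.keys PySem.Dict.empty (fun y => by simp [PySem.Dict.getD_empty]) 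
  have h0c : rev0.contains mk = true := by
    rw [hrev0, rev0_contains]
    simp [hmk]
  rw [revBuild_getD, h0v, h0c, if_pos rfl, List.nil_append]
  -- the entry is g.keys filtered by "mk ∈ g[k]"
  have hitems : g.items = g.keys.map (fun k => (k, g.getD k [])) := PySem.Dict.items_eq_map_keys g hg []
  rw [hitems, List.filter_map, List.map_map]
  have : ((fun p : String × List String => p.1) ∘ fun k => (k, g.getD k [])) = id := rfl
  rw [this, List.map_id]
  set flt := g.keys.filter ((fun p : String × List String => p.2.contains mk) ∘ fun k => (k, g.getD k []))
  have hsub : flt.Sublist g.keys := List.filter_sublist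
  have hnd : flt.Nodup := hsub.nodup hg
  by_cases hx : x ∈ g.keys ∧ (g.getD x []).contains mk = true
  · have hxin : x ∈ flt := by
      rw [List.mem_filter]
      exact ⟨hx.1, by simpa using hx.2⟩
    rw [List.count_eq_one_of_mem hnd hxin, if_pos hx]; rfl
  · have hxout : x ∉ flt := by
      intro hcmem
      rw [List.mem_filter] at hcmem
      exact hx ⟨hcmem.1, by simpa using hcmem.2⟩
    rw [List.count_eq_zero_of_not_mem hxout, if_neg hx]; rfl

-- the candidate list built by A's append loop equals B's filter/map over the items
lemma cand_eq (g : PySem.Dict String (List String)) (s : PySem.Dict String Int)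
    (hs : s.keys.Nodup) :
    s.keys.foldl (fun acc key =>
        if s.getD key 0 ≥ 0 then
          acc ++ [(s.getD key 0, ((g.getD key []).length : Int), key)]
        else acc) []
      = (s.items.filter (fun p => p.2 ≥ 0)).map
          (fun p => (p.2, ((g.getD p.1 []).length : Int), p.1)) := by
  have hstep : (fun (acc : List (Int × Int × String)) key =>
      if s.getD key 0 ≥ 0 then
        acc ++ [(s.getD key 0, ((g.getD key []).length : Int), key)]
      else acc)
      = (fun acc key =>
        if (fun k => decide (s.getD k 0 ≥ 0)) key = true then
          acc ++ [(fun k => (s.getD k 0, ((g.getD k []).length : Int), k)) key]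
        else acc) := by
    funext acc key
    by_cases h : s.getD key 0 ≥ 0 <;> simp [h]
  rw [hstep, PySem.List.foldl_append_if, PySem.Dict.items_eq_map_keys s hs 0,
      List.filter_map, List.map_map]
  rfl

lemma cand_mem (g : PySem.Dict String (List String)) (s : PySem.Dict String Int)
    (t : Int × Int × String)
    (ht : t ∈ (s.items.filter (fun p => p.2 ≥ 0)).map
          (fun p => (p.2, ((g.getD p.1 []).length : Int), p.1))) :
    t.2.2 ∈ s.keys := by
  obtain ⟨p, hp, rfl⟩ := List.mem_map.1 ht
  exact PySem.Dict.mem_keys_of_mem_items _ (List.mem_of_mem_filter hp)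

lemma erase_keys (d : PySem.Dict String Int) (k : String) :
    (d.erase k).keys = d.keys.filter (fun x => !(x == k)) := by
  show ((d.items.filter (fun p => !(p.1 == k))).map (fun p => p.1))
        = (d.items.map (fun p => p.1)).filter (fun x => !(x == k))
  rw [List.filter_map]
  rfl

-- after the pop, B's targeted decrement loop produces the same dict as A's full scan
lemma dec_eq (g rev : PySem.Dict String (List String))
    (hrev : ∀ mk x, mk ∈ g.keys →
      (((rev.getD mk []).count x : Int)
        = if x ∈ g.keys ∧ (g.getD x []).contains mk = true then 1 else 0))
    (s1 : PySem.Dict String Int) (hnd : s1.keys.Nodup)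
    (hsub : ∀ k ∈ s1.keys, k ∈ g.keys) (mk : String) (hmk : mk ∈ g.keys) :
    (rev.getD mk []).foldl (fun d k => if d.contains k then d.modify k 0 (· - 1) else d) s1
      = s1.keys.foldl
          (fun d key => if (g.getD key []).contains mk then d.modify key 0 (· - 1) else d) s1 := by
  obtain ⟨hak, hav⟩ := decA_char (fun key => (g.getD key []).contains mk) s1.keys s1
    (fun k hk => (PySem.Dict.contains_iff_mem_keys s1 k).2 hk)
  obtain ⟨hbk, hbv⟩ := decB_char (rev.getD mk []) s1
  apply PySem.Dict.ext
  rw [PySem.Dict.items_eq_map_keys _ (show _ by rw [hbk]; exact hnd) 0,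
      PySem.Dict.items_eq_map_keys _ (show _ by rw [hak]; exact hnd) 0, hak, hbk]
  refine List.map_congr_left (fun x hxmem => ?_)
  have hcx : s1.contains x = true := (PySem.Dict.contains_iff_mem_keys s1 x).2 hxmem
  have hxg : x ∈ g.keys := hsub x hxmem
  have hcount : ((s1.keys.count x : Nat) : Int) = 1 := by
    rw [List.count_eq_one_of_mem hnd hxmem]; rfl
  rw [hav x, hbv x, hcx, hrev mk x hmk]
  by_cases hgc : (g.getD x []).contains mk = true
  · simp [hxg, hcount]
  · simp [hxg, hcount]

lemma loop_eq (g rev : PySem.Dict String (List String))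
    (hrev : ∀ mk x, mk ∈ g.keys →
      (((rev.getD mk []).count x : Int)
        = if x ∈ g.keys ∧ (g.getD x []).contains mk = true then 1 else 0)) :
    ∀ (fuel : Nat) (s : PySem.Dict String Int), s.keys.Nodup → (∀ k ∈ s.keys, k ∈ g.keys) →
      fiLoopB g rev fuel s = PySem.Set.ofList (fiLoopA g fuel s).keys := by
  intro fuel
  induction fuel with
  | zero => intro s _ _; rfl
  | succ n ih =>
    intro s hnd hsub
    simp only [fiLoopA, fiLoopB]
    rw [cand_eq g s hnd]
    set C := (s.items.filter (fun p => p.2 ≥ 0)).map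
        (fun p => (p.2, ((g.getD p.1 []).length : Int), p.1)) with hC
    by_cases hc : C = []
    · rw [if_pos hc, hc]
      rfl
    · rw [if_neg hc]
      cases hS : PySem.List.sorted C fiKey false with
      | nil => exact absurd ((PySem.List.sorted_eq_nil_iff C fiKey false).1 hS) hc
      | cons t tl =>
        have hmin : PySem.List.min? C fiKey = some t := sorted_head_min? C t tl hS
        have hget : PySem.List.pyGet? (t :: tl) (0 : Int) = some t := by
          simp [PySem.List.pyGet?, PySem.List.pyIdx?]
        rw [hmin, hget]
        dsimp only
        have htC : t ∈ C := (PySem.List.mem_sorted C fiKey false t).1 (hS ▸ List.mem_cons_self)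
        have hmkS : t.2.2 ∈ s.keys := cand_mem g s t htC
        have hmkG : t.2.2 ∈ g.keys := hsub _ hmkS
        have hndE : (s.erase t.2.2).keys.Nodup := by
          rw [erase_keys]; exact hnd.filter _
        have hsubE : ∀ k ∈ (s.erase t.2.2).keys, k ∈ g.keys := by
          intro k hk
          rw [erase_keys] at hk
          exact hsub k (List.mem_of_mem_filter hk)
        rw [dec_eq g rev hrev (s.erase t.2.2) hndE hsubE t.2.2 hmkG]
        obtain ⟨hak, _⟩ := decA_char (fun key => (g.getD key []).contains t.2.2)
          (s.erase t.2.2).keys (s.erase t.2.2)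
          (fun k hk => (PySem.Dict.contains_iff_mem_keys _ k).2 hk)
        refine ih _ ?_ ?_
        · rw [hak]; exact hndE
        · intro k hk
          rw [hak] at hk
          exact hsubE k hk

-- A's and B's initial deficit dicts coincide: n - ceil(n/2) = n // 2 for a length n
lemma init_eq (g : PySem.Dict String (List String)) (hg : g.keys.Nodup) :
    (g.keys.foldl (fun d key =>
        d.insert key (((g.getD key []).length : Int) - fiCeilHalf ((g.getD key []).length : Int)))
        PySem.Dict.empty)
      = g.items.foldl (fun d p => d.insert p.1 (PySem.Int.floordiv (p.2.length : Int) 2))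
          PySem.Dict.empty := by
  apply PySem.Dict.ext
  rw [PySem.Dict.items_foldl_insert_fresh g.keys (fun key => key) _ _
        (fun a _ => PySem.Dict.contains_empty a) (by simpa using hg),
      PySem.Dict.items_foldl_insert_fresh g.items (fun p => p.1) _ _
        (fun a _ => PySem.Dict.contains_empty a.1) hg,
      PySem.Dict.items_eq_map_keys g hg [], List.map_map]
  refine congrArg _ (List.map_congr_left (fun key _ => ?_))
  simp only [Function.comp]
  rw [fiCeilHalf_sub]

lemma init_keys (g : PySem.Dict String (List String)) (hg : g.keys.Nodup) :
    (g.keys.foldl (fun d key =>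
        d.insert key (((g.getD key []).length : Int) - fiCeilHalf ((g.getD key []).length : Int)))
        PySem.Dict.empty).keys = g.keys := by
  show ((g.keys.foldl (fun d key =>
      d.insert key (((g.getD key []).length : Int) - fiCeilHalf ((g.getD key []).length : Int)))
      PySem.Dict.empty).items.map (fun p => p.1)) = g.keys
  rw [PySem.Dict.items_foldl_insert_fresh g.keys (fun key => key) _ _
        (fun a _ => PySem.Dict.contains_empty a) (by simpa using hg)]
  simp [PySem.Dict.empty, Function.comp_def]

theorem find_influencers_spec : Claim_equal_find_influencers := by
  intro graph _
  show find_influencers graph = find_influencers_alt graph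
  simp only [find_influencers, find_influencers_alt]
  have hg := PySem.Dict.nodup_keys_ofList graph
  set g := PySem.Dict.ofList graph with hgdef
  rw [← init_eq g hg]
  set s0 := g.keys.foldl (fun d key =>
      d.insert key (((g.getD key []).length : Int) - fiCeilHalf ((g.getD key []).length : Int)))
      PySem.Dict.empty with hs0
  have hkeys0 : s0.keys = g.keys := init_keys g hg
  exact (loop_eq g _
      (fun mk x hmk => rev_count g hg mk hmk x)
      (s0.size + 1) s0 (hkeys0 ▸ hg) (fun k hk => hkeys0 ▸ hk)).symm
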